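-- pv_equiv track=rewrite | github.com/balwierz/LeetCode | 2645 Minimum Additions to Make Valid String.py | addMinimum
-- ===== SOURCE A (Python) =====
-- def addMinimum(word: str) -> int:
--     ret = 0
--     s = "abc"
--     i = 0
--     for c in word:
--         while s[i] != c:
--             ret += 1
--             i = (i+1) % 3
--         i = (i+1) % 3
--     if word[-1] == 'b': ret += 1
--     if word[-1] == 'a': ret += 2
--     return ret
-- ===== SOURCE B (Python) =====
-- def addMinimum(word: str) -> int:
--     groups = 1
--     for i in range(1, len(word)):
--         if word[i] <= word[i-1]:
--             groups += 1
--     return 3 * groups - len(word)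
-- ===== Notes on version B (the rewrite author's own statement) =====
-- stated objective: simpler
-- what changed: Replaces A's character-by-character automaton simulation (inner while loop skipping over 'abc' positions plus trailing-character fix-ups) by block counting: count the number of 'abc' blocks as 1 + number of non-increasing adjacent pairs and return 3*groups - len(word).
import Mathlib
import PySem

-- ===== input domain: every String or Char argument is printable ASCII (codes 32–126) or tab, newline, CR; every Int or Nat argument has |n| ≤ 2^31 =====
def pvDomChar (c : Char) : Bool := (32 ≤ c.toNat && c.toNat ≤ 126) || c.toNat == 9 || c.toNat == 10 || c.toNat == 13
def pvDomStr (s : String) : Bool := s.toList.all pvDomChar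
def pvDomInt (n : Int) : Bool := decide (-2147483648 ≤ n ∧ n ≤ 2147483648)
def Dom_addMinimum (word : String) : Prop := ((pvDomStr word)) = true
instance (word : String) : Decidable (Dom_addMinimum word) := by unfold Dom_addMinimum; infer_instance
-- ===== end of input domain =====

-- B replaces A's automaton simulation by counting 'abc' blocks (1 + descents) and returning 3*groups - len: simpler, same cost.


-- ===== PORT A =====
-- s[i] for s = "abc", i ∈ {0,1,2}
def pvSGet (i : Nat) : Char := ("abc".toList).getD i ' '

-- the inner `while s[i] != c:` loop; under Pre_ (c ∈ {'a','b','c'}) it matches within 3 steps,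
-- so fuel 3 is exact there; fuel exhaustion is unreachable inside Pre_.
def pvInnerA (c : Char) : Nat → Int → Nat → Int × Nat
  | 0, ret, i => (ret, i)
  | fuel + 1, ret, i =>
    if pvSGet i ≠ c then pvInnerA c fuel (ret + 1) ((i + 1) % 3) else (ret, i)

def addMinimum (word : String) : Int :=
  let st := word.toList.foldl
    (fun (st : Int × Nat) c =>
      let st' := pvInnerA c 3 st.1 st.2
      (st'.1, (st'.2 + 1) % 3)) ((0 : Int), (0 : Nat))
  let ret := st.1
  -- word[-1]; under Pre_ the word is nonempty, so pyGet? returns some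
  match PySem.List.pyGet? word.toList (-1) with
  | none => ret
  | some last => ret + (if last = 'b' then 1 else 0) + (if last = 'a' then 2 else 0)

-- ===== PORT B =====
def addMinimum_alt (word : String) : Int :=
  let l := word.toList
  let groups := (l.zip l.tail).foldl
    (fun (g : Int) (p : Char × Char) => if p.2 ≤ p.1 then g + 1 else g) (1 : Int)
  3 * groups - l.length

-- ===== PRECONDITION & SPEC =====
-- Pre_ excludes the empty string (A raises IndexError at word[-1]) and words with a character
-- outside {'a','b','c'} (A's inner while loop never terminates there).
def Pre_addMinimum (word : String) : Prop :=
  word.toList ≠ [] ∧ word.toList.all (fun c => c == 'a' || c == 'b' || c == 'c') = true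
instance (word : String) : Decidable (Pre_addMinimum word) := by unfold Pre_addMinimum; infer_instance

def pvWitness_addMinimum : String := "abcbc"

def Spec_addMinimum (word : String) (out : Int) : Prop := out = addMinimum_alt word
instance (word : String) (out : Int) : Decidable (Spec_addMinimum word out) := by unfold Spec_addMinimum; infer_instance

-- ===== CLAIM (what is proved, stated in full; the proofs are below) =====
def Claim_equal_addMinimum : Prop := ∀ (word : String), Dom_addMinimum word → Pre_addMinimum word → Spec_addMinimum word (addMinimum word)

-- ===== LEMMAS AND PROOFS =====

-- value of a letter: a↦0, b↦1, c↦2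
def pvV (c : Char) : Nat := if c = 'a' then 0 else if c = 'b' then 1 else 2

-- descent count along a chain starting with previous character p
def pvCnt (p : Char) : List Char → Int
  | [] => 0
  | c :: t => (if c ≤ p then 1 else 0) + pvCnt c t

-- trailing fix-up as a function of last char
def pvTf (c : Char) : Int := (if c = 'b' then 1 else 0) + (if c = 'a' then 2 else 0)

def pvAbc (c : Char) : Prop := c = 'a' ∨ c = 'b' ∨ c = 'c'

theorem pvInnerA_step (p c : Char) (hp : pvAbc p) (hc : pvAbc c) (ret : Int) :
    pvInnerA c 3 ret ((pvV p + 1) % 3)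
      = (ret + ((pvV c : Int) - pvV p - 1 + 3 * (if c ≤ p then 1 else 0)), pvV c) := by
  rcases hp with hp | hp | hp <;> rcases hc with hc | hc | hc <;>
    subst hp <;> subst hc <;> simp [pvInnerA, pvSGet, pvV] <;> try omega

-- A's fold, given previous character p (with start state i = (v p + 1) % 3), plus the
-- trailing fix-up of the final last character, telescopes to block arithmetic.
theorem pvFoldA_eq (l : List Char) : ∀ (p : Char), pvAbc p → (∀ c ∈ l, pvAbc c) → ∀ (ret : Int),
    (l.foldl (fun (st : Int × Nat) c =>
        let st' := pvInnerA c 3 st.1 st.2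
        (st'.1, (st'.2 + 1) % 3)) (ret, (pvV p + 1) % 3)).1
      + pvTf (l.getLastD p)
      = ret + pvTf p + 3 * pvCnt p l - l.length := by
  induction l with
  | nil => intro p _ _ ret; simp [pvCnt]
  | cons c t ih =>
    intro p hp hl ret
    have hc : pvAbc c := hl c (by simp)
    have ht : ∀ x ∈ t, pvAbc x := fun x hx => hl x (by simp [hx])
    simp only [List.foldl_cons, pvInnerA_step p c hp hc ret]
    have := ih c hc ht (ret + ((pvV c : Int) - pvV p - 1 + 3 * (if c ≤ p then 1 else 0)))
    simp only [List.getLastD_cons] at *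
    rw [this]
    rcases hp with hp | hp | hp <;> rcases hc with hc | hc | hc <;>
      subst hp <;> subst hc <;>
      simp [pvCnt, pvV, pvTf, List.length_cons] <;> push_cast <;> ring_nf <;>
      norm_num [Char.le_def] <;> ring

-- B's zip fold equals 1 + descent count
theorem pvFoldB_eq (l : List Char) : ∀ (p : Char) (g : Int),
    (((p :: l).zip l).foldl
        (fun (g : Int) (q : Char × Char) => if q.2 ≤ q.1 then g + 1 else g) g)
      = g + pvCnt p l := by
  induction l with
  | nil => intro p g; simp [pvCnt]
  | cons c t ih =>
    intro p g
    simp only [List.zip_cons_cons, List.foldl_cons, pvCnt]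
    rw [ih c]
    by_cases h : c ≤ p <;> simp [h] <;> ring

theorem pvAbc_le_c (c : Char) (hc : pvAbc c) : c ≤ 'c' := by
  rcases hc with h | h | h <;> subst h <;> decide

-- ===== VERDICT (by name: the statement is the Claim_ definition above) =====
theorem addMinimum_spec : Claim_equal_addMinimum := by
  intro word _ hpre
  rcases hpre with ⟨hne, hall⟩
  have habc : ∀ c ∈ word.toList, c = 'a' ∨ c = 'b' ∨ c = 'c' := by
    intro c hc
    have := List.all_eq_true.mp hall c hc
    simp at this; tauto
  unfold Spec_addMinimum addMinimum addMinimum_alt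
  obtain ⟨c, t, hl⟩ : ∃ c t, word.toList = c :: t := by
    cases h : word.toList with
    | nil => exact absurd h hne
    | cons c t => exact ⟨c, t, rfl⟩
  rw [hl] at habc ⊢
  have hc : pvAbc c := habc c (by simp)
  have ht : ∀ x ∈ t, pvAbc x := fun x hx => habc x (by simp [hx])
  -- start state (0, 0) is (0, (v 'c' + 1) % 3)
  have hstart : ((0 : Int), (0 : Nat)) = ((0 : Int), (pvV 'c' + 1) % 3) := by decide
  rw [hstart]
  have hA := pvFoldA_eq (c :: t) 'c' (by right; right; rfl) habc 0
  -- the last element of a nonempty list via pyGet? (-1)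
  have hlast : PySem.List.pyGet? (c :: t) (-1) = some ((c :: t).getLastD 'c') := by
    rw [PySem.List.pyGet?_neg_one]
    cases h : (c :: t).getLast? with
    | none => simp [List.getLast?_eq_none_iff] at h
    | some x => simp [List.getLastD_eq_getLast?, h]
  rw [hlast]
  -- B side
  have hB := pvFoldB_eq t c 1
  simp only [List.tail_cons] at *
  rw [hB]
  -- A's value: fold result + tf(last) = 0 + tf 'c' + 3*cnt 'c' (c::t) - len
  have htf : ∀ last, (if last = 'b' then (1:Int) else 0) + (if last = 'a' then 2 else 0) = pvTf last := by
    intro last; simp [pvTf]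
  rw [add_assoc, htf]
  have hcle : c ≤ 'c' := pvAbc_le_c c hc
  have hcnt : pvCnt 'c' (c :: t) = 1 + pvCnt c t := by simp [pvCnt, hcle]
  rw [hcnt] at hA
  have htfc : pvTf 'c' = 0 := by decide
  rw [htfc] at hA
  push_cast at hA ⊢
  linarith [hA]
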